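-- pv_equiv track=rewrite | github.com/MarkTwin25/C-mputo-Evolutivo | ag_Vs_aa.py | evaluar_poblacion
-- ===== SOURCE A (Python) =====
-- def evaluar_poblacion(poblacion, subconjuntos, elementos):
--     fitness = [] # lista de valores de fitness
--     for i in range(len(poblacion)): # para cada individuo en la población
--         cobertura = set() # inicializar la cobertura
--         for j in range(len(poblacion[i])): # para cada subconjunto en el individuo
--             if poblacion[i][j] == 1: # si el subconjunto está seleccionado
--                 cobertura = cobertura.union(subconjuntos[j]) # agregar los elementos del subconjunto a la cobertura
--         fitness.append(len(cobertura.intersection(elementos))) # calcular el fitness como la cantidad de elementos cubiertos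
--     return fitness
-- ===== SOURCE B (Python) =====
-- def evaluar_poblacion(poblacion, subconjuntos, elementos):
--     # Element-centric: for each individual count the distinct target elements covered by
--     # some selected subset; no running coverage union is maintained. Subset membership is
--     # queried against sets built once, and each individual's selected indices are listed once.
--     sets = [set(s) for s in subconjuntos]
--     elems = set(elementos)
--     fitness = []
--     for ind in poblacion:
--         sel = [j for j in range(len(ind)) if ind[j] == 1]
--         fitness.append(sum(1 for e in elems if any(e in sets[j] for j in sel)))
--     return fitness
-- ===== Notes on version B (the rewrite author's own statement) =====
-- stated objective: alternative
-- what changed: B computes each fitness element-centrically (count distinct target elements covered by some selected subset, querying precomputed subset sets) instead of A's building a growing coverage union set per individual and intersecting it with elementos.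
import Mathlib
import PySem

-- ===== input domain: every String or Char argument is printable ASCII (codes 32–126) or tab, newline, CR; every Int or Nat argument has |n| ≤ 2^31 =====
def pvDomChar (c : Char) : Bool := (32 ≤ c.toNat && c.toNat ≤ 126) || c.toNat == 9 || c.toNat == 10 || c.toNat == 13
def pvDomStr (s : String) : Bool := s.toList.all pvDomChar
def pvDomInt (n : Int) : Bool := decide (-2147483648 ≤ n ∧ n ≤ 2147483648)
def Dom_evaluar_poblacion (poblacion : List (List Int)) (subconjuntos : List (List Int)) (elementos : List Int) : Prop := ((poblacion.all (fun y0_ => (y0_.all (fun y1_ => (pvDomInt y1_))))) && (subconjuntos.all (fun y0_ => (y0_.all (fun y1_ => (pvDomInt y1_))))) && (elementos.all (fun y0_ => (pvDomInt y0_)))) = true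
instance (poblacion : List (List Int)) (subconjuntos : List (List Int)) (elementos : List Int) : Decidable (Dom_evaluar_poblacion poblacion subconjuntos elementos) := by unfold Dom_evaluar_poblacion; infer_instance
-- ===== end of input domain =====

-- B re-implements the coverage fitness element-centrically (count target elements covered by
-- some selected subset) instead of A's growing coverage-union set; same cost class, no speed claim.

-- ===== PORT A =====
-- index accesses use pyGetD with indices that are in range by construction (range(len(..)));
-- the access subconjuntos[j] is exact under Pre_evaluar_poblacion (A raises IndexError outside it).
def evaluar_poblacion (poblacion : List (List Int)) (subconjuntos : List (List Int)) (elementos : List Int) : List Int :=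
  (List.range poblacion.length).foldl (fun (fitness : List Int) (i : Nat) =>
    let ind := PySem.List.pyGetD poblacion (i : Int) []
    let cobertura := (List.range ind.length).foldl (fun (cob : PySem.Set Int) (j : Nat) =>
      if PySem.List.pyGetD ind (j : Int) 0 = 1 then
        PySem.Set.union cob (PySem.List.pyGetD subconjuntos (j : Int) [])
      else cob) (PySem.Set.empty : PySem.Set Int)
    fitness ++ [((PySem.Set.inter cobertura elementos).length : Int)]) []

-- ===== PORT B =====
def evaluar_poblacion_alt (poblacion : List (List Int)) (subconjuntos : List (List Int)) (elementos : List Int) : List Int :=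
  let sets := subconjuntos.map (fun s => PySem.Set.ofList s)
  let elems := PySem.Set.ofList elementos
  poblacion.foldl (fun (fitness : List Int) (ind : List Int) =>
    let sel := (List.range ind.length).filter (fun (j : Nat) => PySem.List.pyGetD ind (j : Int) 0 == 1)
    fitness ++ [((elems.countP (fun e =>
      sel.any (fun (j : Nat) => (PySem.List.pyGetD sets (j : Int) []).contains e))) : Int)]) []

-- ===== PRECONDITION & SPEC =====
-- Pre_ excludes exactly the inputs where Python A raises IndexError: some individual selects
-- (value 1 at) a position j with no j-th subconjunto.
def Pre_evaluar_poblacion (poblacion : List (List Int)) (subconjuntos : List (List Int)) (elementos : List Int) : Prop :=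
  ∀ ind ∈ poblacion, ∀ j ∈ List.range ind.length, ind.getD j 0 = 1 → j < subconjuntos.length
instance (poblacion : List (List Int)) (subconjuntos : List (List Int)) (elementos : List Int) : Decidable (Pre_evaluar_poblacion poblacion subconjuntos elementos) := by unfold Pre_evaluar_poblacion; infer_instance

def pvWitness_evaluar_poblacion : List (List Int) × List (List Int) × List Int :=
  ([[1, 0], [0, 1]], [[1, 2], [3]], [2, 3, 7])

def Spec_evaluar_poblacion (poblacion : List (List Int)) (subconjuntos : List (List Int)) (elementos : List Int) (out : List Int) : Prop := out = evaluar_poblacion_alt poblacion subconjuntos elementos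
instance (poblacion : List (List Int)) (subconjuntos : List (List Int)) (elementos : List Int) (out : List Int) : Decidable (Spec_evaluar_poblacion poblacion subconjuntos elementos out) := by unfold Spec_evaluar_poblacion; infer_instance

-- ===== CLAIM (what is proved, stated in full; the proofs are below) =====
def Claim_equal_evaluar_poblacion : Prop := ∀ (poblacion : List (List Int)) (subconjuntos : List (List Int)) (elementos : List Int), Dom_evaluar_poblacion poblacion subconjuntos elementos → Pre_evaluar_poblacion poblacion subconjuntos elementos → Spec_evaluar_poblacion poblacion subconjuntos elementos (evaluar_poblacion poblacion subconjuntos elementos)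

-- ===== LEMMAS AND PROOFS =====

-- the inner coverage fold of A, for one individual
def pvCob (subconjuntos : List (List Int)) (ind : List Int) : PySem.Set Int :=
  (List.range ind.length).foldl (fun (cob : PySem.Set Int) (j : Nat) =>
    if PySem.List.pyGetD ind (j : Int) 0 = 1 then
      PySem.Set.union cob (PySem.List.pyGetD subconjuntos (j : Int) [])
    else cob) (PySem.Set.empty : PySem.Set Int)

lemma pvCob_mem_aux (subconjuntos : List (List Int)) (ind : List Int) (l : List Nat)
    (s : PySem.Set Int) (x : Int) :
    (x ∈ l.foldl (fun (cob : PySem.Set Int) (j : Nat) =>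
      if PySem.List.pyGetD ind (j : Int) 0 = 1 then
        PySem.Set.union cob (PySem.List.pyGetD subconjuntos (j : Int) [])
      else cob) s) ↔
    x ∈ s ∨ ∃ j ∈ l, PySem.List.pyGetD ind (j : Int) 0 = 1 ∧
      x ∈ PySem.List.pyGetD subconjuntos (j : Int) [] := by
  induction l generalizing s with
  | nil => simp
  | cons a t ih =>
    simp only [List.foldl_cons, ih]
    by_cases h : PySem.List.pyGetD ind (a : Int) 0 = 1
    · simp only [if_pos h, PySem.Set.mem_union, List.exists_mem_cons_iff]
      tauto
    · simp only [if_neg h, List.exists_mem_cons_iff]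
      tauto

lemma pvCob_nodup_aux (subconjuntos : List (List Int)) (ind : List Int) (l : List Nat)
    (s : PySem.Set Int) (hs : s.Nodup) :
    (l.foldl (fun (cob : PySem.Set Int) (j : Nat) =>
      if PySem.List.pyGetD ind (j : Int) 0 = 1 then
        PySem.Set.union cob (PySem.List.pyGetD subconjuntos (j : Int) [])
      else cob) s).Nodup := by
  induction l generalizing s with
  | nil => simpa
  | cons a t ih =>
    simp only [List.foldl_cons]
    split_ifs with h
    · exact ih _ (PySem.Set.nodup_union _ _ hs)
    · exact ih _ hs

lemma pvCob_mem (subconjuntos : List (List Int)) (ind : List Int) (x : Int) :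
    x ∈ pvCob subconjuntos ind ↔
    ∃ j ∈ List.range ind.length, PySem.List.pyGetD ind (j : Int) 0 = 1 ∧
      x ∈ PySem.List.pyGetD subconjuntos (j : Int) [] := by
  unfold pvCob
  rw [pvCob_mem_aux]
  simp [PySem.Set.empty]

lemma pvCob_nodup (subconjuntos : List (List Int)) (ind : List Int) :
    (pvCob subconjuntos ind).Nodup :=
  pvCob_nodup_aux _ _ _ _ List.nodup_nil

-- elementwise: the precomputed ofList sets looked up by index
lemma pv_getD_map_ofList (l : List (List Int)) (j : Nat) :
    PySem.List.pyGetD (l.map (fun s => PySem.Set.ofList s)) (j : Int) [] =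
      PySem.Set.ofList (PySem.List.pyGetD l (j : Int) []) := by
  simp only [PySem.List.pyGetD_natCast]
  cases h : l[j]? <;> simp [h, PySem.Set.ofList]

-- one individual: A's |cobertura ∩ elementos| equals B's element-centric count
lemma pv_individual (subconjuntos : List (List Int)) (elementos : List Int) (ind : List Int) :
    ((PySem.Set.inter (pvCob subconjuntos ind) elementos).length : Int) =
    (((PySem.Set.ofList elementos).countP (fun e =>
        ((List.range ind.length).filter (fun (j : Nat) =>
            PySem.List.pyGetD ind (j : Int) 0 == 1)).any (fun (j : Nat) =>
          (PySem.List.pyGetD (subconjuntos.map (fun s => PySem.Set.ofList s)) (j : Int) []).contains e))) : Int) := by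
  congr 1
  rw [List.countP_eq_length_filter]
  have hperm : (PySem.Set.inter (pvCob subconjuntos ind) elementos).Perm
      ((PySem.Set.ofList elementos).filter (fun e =>
        ((List.range ind.length).filter (fun (j : Nat) =>
            PySem.List.pyGetD ind (j : Int) 0 == 1)).any (fun (j : Nat) =>
          (PySem.List.pyGetD (subconjuntos.map (fun s => PySem.Set.ofList s)) (j : Int) []).contains e))) := by
    rw [List.perm_ext_iff_of_nodup
      (PySem.Set.nodup_inter _ _ (pvCob_nodup subconjuntos ind))
      (List.Nodup.filter _ (PySem.Set.nodup_ofList elementos))]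
    intro a
    rw [PySem.Set.mem_inter, List.mem_filter, PySem.Set.mem_ofList, pvCob_mem]
    simp only [List.any_eq_true, List.mem_filter, pv_getD_map_ofList, beq_iff_eq]
    simp only [PySem.Set.contains_iff, PySem.Set.mem_ofList]
    tauto
  exact hperm.length_eq

lemma pv_foldl_append {α β : Type} (f : α → β) (l : List α) (acc : List β) :
    l.foldl (fun acc x => acc ++ [f x]) acc = acc ++ l.map f := by
  induction l generalizing acc with
  | nil => simp
  | cons a t ih => simp [ih]

-- ===== VERDICT (by name: the statement is the Claim_ definition above) =====
theorem evaluar_poblacion_spec : Claim_equal_evaluar_poblacion := by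
  intro poblacion subconjuntos elementos _ _
  unfold Spec_evaluar_poblacion evaluar_poblacion evaluar_poblacion_alt
  change (List.foldl (fun (fitness : List Int) (i : Nat) => fitness ++
    [((PySem.Set.inter (pvCob subconjuntos (PySem.List.pyGetD poblacion (i : Int) []))
      elementos).length : Int)]) [] (List.range poblacion.length)) =
    (List.foldl (fun (fitness : List Int) (ind : List Int) => fitness ++
      [(((PySem.Set.ofList elementos).countP (fun e =>
        ((List.range ind.length).filter (fun (j : Nat) =>
            PySem.List.pyGetD ind (j : Int) 0 == 1)).any (fun (j : Nat) =>
          (PySem.List.pyGetD (subconjuntos.map (fun s => PySem.Set.ofList s)) (j : Int) []).contains e))) : Int)]) [] poblacion)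
  rw [pv_foldl_append (fun (i : Nat) =>
    ((PySem.Set.inter (pvCob subconjuntos (PySem.List.pyGetD poblacion (i : Int) []))
      elementos).length : Int)) (List.range poblacion.length) [],
    pv_foldl_append (fun (ind : List Int) =>
      (((PySem.Set.ofList elementos).countP (fun e =>
        ((List.range ind.length).filter (fun (j : Nat) =>
            PySem.List.pyGetD ind (j : Int) 0 == 1)).any (fun (j : Nat) =>
          (PySem.List.pyGetD (subconjuntos.map (fun s => PySem.Set.ofList s)) (j : Int) []).contains e))) : Int)) poblacion []]
  simp only [List.nil_append]
  apply List.ext_getElem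
  · simp
  · intro i hi hi'
    simp only [List.getElem_map, List.getElem_range]
    rw [pv_individual]
    have hlen : i < poblacion.length := by simpa using hi
    simp [List.getElem?_eq_getElem hlen]
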